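-- pv_equiv track=rewrite | github.com/sssungjin/Algorithm | 프로그래머스/3/161988. 연속 펄스 부분 수열의 합/연속 펄스 부분 수열의 합.py | pulse_max
-- ===== SOURCE A (Python) =====
-- def pulse_max(arr):
--     pulse1 = [-1, 1]
--     pulse2 = [1, -1]
--     sum1 = 0
--     sum2 = 0
--     for i in range(len(arr)):
--         if i % 2 == 0:
--             sum1 += pulse1[0] * arr[i]
--         else:
--             sum1 += pulse1[1] * arr[i]
--
--     for i in range(len(arr)):
--         if i % 2 == 0:
--             sum2 += pulse2[0] * arr[i]
--         else:
--             sum2 += pulse2[1] * arr[i]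
--
--     return max(sum1, sum2)
-- ===== SOURCE B (Python) =====
-- def pulse_max(arr):
--     total = 0
--     sign = -1
--     for x in arr:
--         total += sign * x
--         sign = -sign
--     return abs(total)
-- ===== Notes on version B (the rewrite author's own statement) =====
-- stated objective: simpler
-- what changed: The two index-based passes and max(sum1, sum2) are replaced by one direct pass over the elements with a flipping sign and abs(total), using the identity sum2 = -sum1.
import Mathlib
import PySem

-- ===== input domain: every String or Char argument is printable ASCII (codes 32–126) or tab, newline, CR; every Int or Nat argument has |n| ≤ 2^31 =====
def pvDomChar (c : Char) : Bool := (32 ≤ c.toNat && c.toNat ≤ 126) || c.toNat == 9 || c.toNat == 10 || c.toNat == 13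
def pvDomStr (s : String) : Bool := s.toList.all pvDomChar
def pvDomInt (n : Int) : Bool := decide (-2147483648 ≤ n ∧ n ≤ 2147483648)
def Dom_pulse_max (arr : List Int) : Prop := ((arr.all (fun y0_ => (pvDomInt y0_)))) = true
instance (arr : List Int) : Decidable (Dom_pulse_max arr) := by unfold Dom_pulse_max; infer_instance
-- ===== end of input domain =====

-- B replaces A's two index-based passes plus max(sum1, sum2) by one sign-flipping pass and abs (simpler; sum2 = -sum1 always).

-- ===== PORT A =====
def pulse_max (arr : List Int) : Int :=
  let pulse1 : List Int := [-1, 1]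
  let pulse2 : List Int := [1, -1]
  let sum1 : Int :=
    (PySem.List.pyRange 0 arr.length 1).foldl (fun s i =>
      if i % 2 == 0 then s + PySem.List.pyGetD pulse1 0 0 * PySem.List.pyGetD arr i 0
      else s + PySem.List.pyGetD pulse1 1 0 * PySem.List.pyGetD arr i 0) 0
  let sum2 : Int :=
    (PySem.List.pyRange 0 arr.length 1).foldl (fun s i =>
      if i % 2 == 0 then s + PySem.List.pyGetD pulse2 0 0 * PySem.List.pyGetD arr i 0
      else s + PySem.List.pyGetD pulse2 1 0 * PySem.List.pyGetD arr i 0) 0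
  max sum1 sum2

-- ===== PORT B =====
def pulse_max_alt (arr : List Int) : Int :=
  let p := arr.foldl (fun (p : Int × Int) x => (p.1 + p.2 * x, -p.2)) (0, -1)
  -- abs(total): Python abs on int
  if p.1 < 0 then -p.1 else p.1

-- ===== PRECONDITION & SPEC =====
def Spec_pulse_max (arr : List Int) (out : Int) : Prop := out = pulse_max_alt arr
instance (arr : List Int) (out : Int) : Decidable (Spec_pulse_max arr out) := by unfold Spec_pulse_max; infer_instance

-- ===== CLAIM (what is proved, stated in full; the proofs are below) =====
def Claim_equal_pulse_max : Prop := ∀ (arr : List Int), Dom_pulse_max arr → Spec_pulse_max arr (pulse_max arr)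

-- ===== LEMMAS AND PROOFS =====

/-- Alternating-sign sum with starting sign `sg`. -/
def altS (xs : List Int) (sg : Int) : Int :=
  match xs with
  | [] => 0
  | x :: xs => sg * x + altS xs (-sg)

theorem altS_neg (xs : List Int) : ∀ sg : Int, altS xs (-sg) = -altS xs sg := by
  induction xs with
  | nil => intro sg; simp [altS]
  | cons x xs ih =>
      intro sg
      simp only [altS, neg_neg]
      have := ih (-sg)
      rw [neg_neg] at this
      rw [this]
      ring

/-- B's pair fold computes the alternating sum (first component). -/
theorem foldB (xs : List Int) : ∀ (t sg : Int),
    (xs.foldl (fun (p : Int × Int) x => (p.1 + p.2 * x, -p.2)) (t, sg)).1 = t + altS xs sg := by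
  induction xs with
  | nil => intro t sg; simp [altS]
  | cons x xs ih =>
      intro t sg
      simp only [List.foldl_cons, altS]
      rw [ih]
      ring

/-- A's index-loop over `range(len(xs))` with any body that adds the alternating term. -/
theorem foldA (xs : List Int) : ∀ (sg s : Int) (f : Int → ℕ → Int),
    (∀ (a : Int) (k : ℕ), f a k = a + (if k % 2 = 0 then sg else -sg) * xs.getD k 0) →
    ((List.range xs.length).foldl f s) = s + altS xs sg := by
  induction xs with
  | nil => intro sg s f _; simp [altS]
  | cons x xs ih =>
      intro sg s f hf
      rw [List.length_cons, List.range_succ_eq_map]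
      rw [List.foldl_cons, List.foldl_map]
      rw [ih (-sg) (f s 0) (fun a k => f a (k + 1)) ?_]
      · rw [hf s 0]; norm_num [altS]; ring
      · intro a k
        show f a (k + 1) = a + (if k % 2 = 0 then -sg else - -sg) * xs.getD k 0
        rw [hf a (k + 1)]
        have hgd : (x :: xs).getD (k + 1) 0 = xs.getD k 0 := rfl
        by_cases hk : k % 2 = 0
        · rw [if_neg (by omega), if_pos hk, hgd]
        · rw [if_pos (by omega), if_neg hk, hgd, neg_neg]

-- ===== VERDICT (by name: the statement is the Claim_ definition above) =====
theorem pulse_max_spec : Claim_equal_pulse_max := by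
  intro arr _
  unfold Spec_pulse_max pulse_max pulse_max_alt
  simp only [PySem.List.pyRange_zero_natCast, List.foldl_map]
  rw [foldA arr (-1) 0 _ ?h1, foldA arr 1 0 _ ?h2, foldB arr 0 (-1)]
  case h1 =>
    intro a k
    simp only [PySem.List.pyGetD_natCast]
    have hm : ((k : Int)) % 2 = ((k % 2 : ℕ) : Int) := by omega
    by_cases hk : k % 2 = 0
    · have hb : (((k : Int)) % 2 == 0) = true := by rw [hm, hk]; decide
      simp [hb, hk, PySem.List.pyGetD]
    · have hb : (((k : Int)) % 2 == 0) = false := by rw [hm]; simp; omega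
      simp [hb, hk, PySem.List.pyGetD]
  case h2 =>
    intro a k
    simp only [PySem.List.pyGetD_natCast]
    have hm : ((k : Int)) % 2 = ((k % 2 : ℕ) : Int) := by omega
    by_cases hk : k % 2 = 0
    · have hb : (((k : Int)) % 2 == 0) = true := by rw [hm, hk]; decide
      simp [hb, hk, PySem.List.pyGetD]
    · have hb : (((k : Int)) % 2 == 0) = false := by rw [hm]; simp; omega
      simp [hb, hk, PySem.List.pyGetD]
  · have h1 := altS_neg arr 1
    simp only [zero_add]
    rw [show altS arr 1 = -altS arr (-1) by rw [h1, neg_neg]]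
    by_cases h : altS arr (-1) < 0
    · rw [max_eq_right (by omega), if_pos h]
    · rw [max_eq_left (by omega), if_neg h]
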